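-- pv_equiv track=rewrite | github.com/adamcy99/Study | CodeSignal Study/Practice5.py | solution
-- ===== SOURCE A (Python) =====
-- def solution(queryType, query):
--     store = {}
--     output = 0
--     keyAdd = 0
--     valAdd = 0
--     for i in range(len(queryType)):
--         if queryType[i] == 'insert':
--             x, y = query[i]
--             store[x-keyAdd] = y-valAdd
--         elif queryType[i] == 'get':
--             output += store[query[i][0]-keyAdd] + valAdd
--         elif queryType[i] == 'addToKey':
--             keyAdd += query[i][0]
--         elif queryType[i] == 'addToValue':
--             valAdd += query[i][0]
--     return output
-- ===== SOURCE B (Python) =====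
-- def solution(queryType, query):
--     # Pass 1: the (keyAdd, valAdd) frame in effect *before* each query.
--     frames = []
--     ka = va = 0
--     for t, q in zip(queryType, query):
--         frames.append((ka, va))
--         if t == 'addToKey':
--             ka += q[0]
--         elif t == 'addToValue':
--             va += q[0]
--     # Pass 2: answer each 'get' by scanning backwards for the latest matching insert.
--     total = 0
--     for j, (t, q) in enumerate(zip(queryType, query)):
--         if t == 'get':
--             kj, vj = frames[j]
--             target = q[0] - kj
--             for i in range(j - 1, -1, -1):
--                 if queryType[i] == 'insert' and query[i][0] - frames[i][0] == target:
--                     total += query[i][1] - frames[i][1] + vj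
--                     break
--             else:
--                 raise KeyError(q[0])
--     return total
-- ===== Notes on version B (the rewrite author's own statement) =====
-- stated objective: alternative
-- what changed: B removes the dict and the live offset bookkeeping entirely: a first pass records the (keyAdd,valAdd) frame before each query as prefix sums, then each 'get' is answered independently by scanning backwards for the latest frame-adjusted matching 'insert'.
import Mathlib
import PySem

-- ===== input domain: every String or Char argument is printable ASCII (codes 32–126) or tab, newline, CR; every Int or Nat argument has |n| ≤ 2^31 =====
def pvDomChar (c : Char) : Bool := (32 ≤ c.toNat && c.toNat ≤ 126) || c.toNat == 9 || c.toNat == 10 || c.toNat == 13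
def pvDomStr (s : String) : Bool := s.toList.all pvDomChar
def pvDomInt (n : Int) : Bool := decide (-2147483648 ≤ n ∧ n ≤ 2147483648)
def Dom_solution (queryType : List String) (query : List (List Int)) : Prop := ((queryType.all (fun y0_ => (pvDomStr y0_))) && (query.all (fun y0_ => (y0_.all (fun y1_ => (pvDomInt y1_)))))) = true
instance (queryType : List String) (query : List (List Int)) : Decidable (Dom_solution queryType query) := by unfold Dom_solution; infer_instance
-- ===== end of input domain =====

-- B replaces A's dict+offsets single pass by two passes: prefix-sum frames, then a backward scan per 'get'.

-- ===== PORT A =====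
-- A's loop `for i in range(len(queryType))` reads queryType[i] and query[i]; it is rendered
-- as lockstep recursion on queryType carrying the rest of query (query[i] = head of the rest;
-- a missing query[i], a bad unpack, or a missing get-key is Python's exception = none here).
def loopA : List String → List (List Int) → PySem.Dict Int Int → Int → Int → Int → Option Int
  | [], _, _, out, _, _ => some out
  | qt :: qts, qs, store, out, ka, va =>
    if qt = "insert" then
      match qs with
      | (x :: y :: []) :: qs' => loopA qts qs' (store.insert (x - ka) (y - va)) out ka va
      | _ => none
    else if qt = "get" then
      match qs with
      | (k :: _) :: qs' =>
        match store.get? (k - ka) with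
        | some v => loopA qts qs' store (out + (v + va)) ka va
        | none => none
      | _ => none
    else if qt = "addToKey" then
      match qs with
      | (x :: _) :: qs' => loopA qts qs' store out (ka + x) va
      | _ => none
    else if qt = "addToValue" then
      match qs with
      | (x :: _) :: qs' => loopA qts qs' store out ka (va + x)
      | _ => none
    else loopA qts (qs.drop 1) store out ka va

def solution (queryType : List String) (query : List (List Int)) : Int :=
  (loopA queryType query PySem.Dict.empty 0 0 0).getD 0

-- ===== PORT B =====
-- Pass 1 of B: `frames` = the (ka, va) offsets in effect before each query, over zip(queryType, query)
-- (zip truncates; a missing q[0] on an add-query is Python's IndexError = none).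
def framesB : List String → List (List Int) → Int → Int → Option (List (Int × Int))
  | [], _, _, _ => some []
  | _ :: _, [], _, _ => some []
  | t :: ts, q :: qs, ka, va =>
    if t = "addToKey" then
      match q with
      | x :: _ => (framesB ts qs (ka + x) va).map ((ka, va) :: ·)
      | [] => none
    else if t = "addToValue" then
      match q with
      | x :: _ => (framesB ts qs ka (va + x)).map ((ka, va) :: ·)
      | [] => none
    else (framesB ts qs ka va).map ((ka, va) :: ·)

-- B's inner `for i in range(j-1, -1, -1)` over (queryType[i], query[i], frames[i]), latest first:
-- first 'insert' with query[i][0] - frames[i][0] == target yields (query[i][1], frames[i][1]); none = KeyError/IndexError.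
def scanB : List (String × List Int × (Int × Int)) → Int → Option (Int × Int)
  | [], _ => none
  | (t, q, f) :: rest, target =>
    if t = "insert" then
      match q with
      | [] => none
      | x :: q' =>
        if x - f.1 = target then
          match q' with
          | y :: _ => some (y, f.2)
          | [] => none
        else scanB rest target
    else scanB rest target

-- Pass 2 of B: walk the zipped triples keeping the processed prefix reversed (for the backward scan).
def pass2B : List (String × List Int × (Int × Int)) → List (String × List Int × (Int × Int)) → Int → Option Int
  | [], _, tot => some tot
  | (t, q, f) :: rest, prev, tot =>
    if t = "get" then
      match q with
      | k :: _ =>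
        match scanB prev (k - f.1) with
        | some (y, vai) => pass2B rest ((t, q, f) :: prev) (tot + (y - vai + f.2))
        | none => none
      | [] => none
    else pass2B rest ((t, q, f) :: prev) tot

def solution_alt (queryType : List String) (query : List (List Int)) : Int :=
  (((framesB queryType query 0 0).bind (fun fs =>
      pass2B (queryType.zip (query.zip fs)) [] 0))).getD 0

-- ===== PRECONDITION & SPEC =====
-- kaPre qt q j = the keyAdd offset in effect before query j (a prefix-sum formula).
def kaPre (queryType : List String) (query : List (List Int)) (j : Nat) : Int :=
  ((List.range j).map (fun i =>
    if queryType.getD i "" = "addToKey" then (query.getD i []).headD 0 else 0)).sum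

-- Pre_ admits exactly the inputs on which Python A returns normally (no exception):
-- every 'insert' has query[i] of length exactly 2 (the unpack), every other recognized
-- query has query[i] nonempty, and every 'get' key was inserted by an earlier 'insert'
-- after adjusting both by the keyAdd offset in effect at their positions (else KeyError).
def Pre_solution (queryType : List String) (query : List (List Int)) : Prop :=
  (∀ i, i < queryType.length →
      (queryType.getD i "" = "insert" → (query.getD i []).length = 2) ∧
      ((queryType.getD i "" = "get" ∨ queryType.getD i "" = "addToKey" ∨
        queryType.getD i "" = "addToValue") → query.getD i [] ≠ [])) ∧
  (∀ j, j < queryType.length → queryType.getD j "" = "get" →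
      ∃ i, i < j ∧ queryType.getD i "" = "insert" ∧
        (query.getD i []).headD 0 - kaPre queryType query i =
          (query.getD j []).headD 0 - kaPre queryType query j)
instance (queryType : List String) (query : List (List Int)) : Decidable (Pre_solution queryType query) := by unfold Pre_solution; infer_instance

def pvWitness_solution : List String × List (List Int) :=
  (["insert", "addToKey", "get"], [[1, 2], [5], [6]])

def Spec_solution (queryType : List String) (query : List (List Int)) (out : Int) : Prop := out = solution_alt queryType query
instance (queryType : List String) (query : List (List Int)) (out : Int) : Decidable (Spec_solution queryType query out) := by unfold Spec_solution; infer_instance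

-- ===== CLAIM (what is proved, stated in full; the proofs are below) =====
def Claim_equal_solution : Prop := ∀ (queryType : List String) (query : List (List Int)), Dom_solution queryType query → Pre_solution queryType query → Spec_solution queryType query (solution queryType query)

-- ===== LEMMAS AND PROOFS =====

-- okA re-runs A's control flow tracking only which adjusted keys exist: it is the bridge
-- between the closed-form Pre_ and A's loop (Pre_ → okA = true is proved below).
def okA : List String → List (List Int) → Int → List Int → Bool
  | [], _, _, _ => true
  | qt :: qts, qs, ka, keys =>
    if qt = "insert" then
      match qs with
      | (x :: _ :: []) :: qs' => okA qts qs' ka ((x - ka) :: keys)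
      | _ => false
    else if qt = "get" then
      match qs with
      | (k :: _) :: qs' => decide ((k - ka) ∈ keys) && okA qts qs' ka keys
      | _ => false
    else if qt = "addToKey" then
      match qs with
      | (x :: _) :: qs' => okA qts qs' (ka + x) keys
      | _ => false
    else if qt = "addToValue" then
      match qs with
      | (_ :: _) :: qs' => okA qts qs' ka keys
      | _ => false
    else okA qts (qs.drop 1) ka keys

-- When query is exhausted, okA forces the remaining types to be unrecognized, so A just returns out.
lemma loopA_nil (qts : List String) : ∀ (ka : Int) (keys : List Int),
    okA qts [] ka keys = true →
    ∀ (store : PySem.Dict Int Int) (out va : Int), loopA qts [] store out ka va = some out := by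
  induction qts with
  | nil => intro _ _ _ _ _ _; simp [loopA]
  | cons qt qts ih =>
    intro ka keys hok store out va
    simp only [okA] at hok
    simp only [loopA]
    by_cases h1 : qt = "insert"
    · rw [if_pos h1] at hok; exact (Bool.false_ne_true hok).elim
    · simp only [if_neg h1] at hok ⊢
      by_cases h2 : qt = "get"
      · rw [if_pos h2] at hok; exact (Bool.false_ne_true hok).elim
      · simp only [if_neg h2] at hok ⊢
        by_cases h3 : qt = "addToKey"
        · rw [if_pos h3] at hok; exact (Bool.false_ne_true hok).elim
        · simp only [if_neg h3] at hok ⊢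
          by_cases h4 : qt = "addToValue"
          · rw [if_pos h4] at hok; exact (Bool.false_ne_true hok).elim
          · simp only [if_neg h4] at hok ⊢
            exact ih ka keys hok store out va

-- Main invariant: A's store holds the frame-adjusted latest inserts of the processed prefix:
-- store.get? k = scanB prev k (value y - va_i), and keys tracks exactly the present keys.
lemma loop_agree (qts : List String) : ∀ (qs : List (List Int))
    (store : PySem.Dict Int Int) (prev : List (String × List Int × (Int × Int)))
    (out ka va : Int) (keys : List Int),
    (∀ k, store.get? k = (scanB prev k).map (fun p => p.1 - p.2)) →
    (∀ k, k ∈ keys ↔ (store.get? k).isSome) →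
    okA qts qs ka keys = true →
    ∃ fs, framesB qts qs ka va = some fs ∧
      pass2B (qts.zip (qs.zip fs)) prev out = loopA qts qs store out ka va := by
  induction qts with
  | nil =>
    intro qs store prev out ka va keys _ _ _
    exact ⟨[], rfl, by cases qs <;> simp [loopA, pass2B]⟩
  | cons qt qts ih =>
    intro qs store prev out ka va keys hst hkeys hok
    cases qs with
    | nil =>
      refine ⟨[], rfl, ?_⟩
      rw [loopA_nil (qt :: qts) ka keys hok store out va]
      simp [pass2B]
    | cons q qs' =>
      simp only [okA] at hok
      by_cases h1 : qt = "insert"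
      · subst h1
        rcases q with _ | ⟨x, _ | ⟨y, _ | ⟨z, r⟩⟩⟩
        · exact (Bool.false_ne_true hok).elim
        · exact (Bool.false_ne_true hok).elim
        · -- q = [x, y]
          have hok' : okA qts qs' ka ((x - ka) :: keys) = true := hok
          have hst' : ∀ k, (store.insert (x - ka) (y - va)).get? k =
              (scanB (("insert", [x, y], (ka, va)) :: prev) k).map (fun p => p.1 - p.2) := by
            intro k
            rw [PySem.Dict.get?_insert]
            show _ = (if x - ka = k then some (y, va) else scanB prev k).map (fun p => p.1 - p.2)
            by_cases hk : k = x - ka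
            · subst hk; simp
            · rw [if_neg hk, if_neg (fun h => hk h.symm)]
              exact hst k
          have hkeys' : ∀ k, k ∈ (x - ka) :: keys ↔
              (((store.insert (x - ka) (y - va)).get? k)).isSome := by
            intro k
            rw [PySem.Dict.get?_insert]
            by_cases hk : k = x - ka
            · subst hk; simp
            · rw [if_neg hk]
              constructor
              · intro hm
                rcases List.mem_cons.mp hm with h | h
                · exact absurd h hk
                · exact (hkeys k).mp h
              · intro h
                exact List.mem_cons.mpr (Or.inr ((hkeys k).mpr h))
          obtain ⟨fs', hfs', hp2⟩ := ih qs' (store.insert (x - ka) (y - va))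
            (("insert", [x, y], (ka, va)) :: prev) out ka va ((x - ka) :: keys) hst' hkeys' hok'
          refine ⟨(ka, va) :: fs', ?_, ?_⟩
          · show (framesB qts qs' ka va).map ((ka, va) :: ·) = some ((ka, va) :: fs')
            rw [hfs']; rfl
          · show pass2B (("insert", [x, y], (ka, va)) :: (qts.zip (qs'.zip fs'))) prev out = _
            simp only [pass2B, loopA]
            rw [if_neg (by decide : ¬ ("insert" : String) = "get")]
            exact hp2
        · exact (Bool.false_ne_true hok).elim
      · rw [if_neg h1] at hok
        by_cases h2 : qt = "get"
        · subst h2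
          rw [if_pos rfl] at hok
          rcases q with _ | ⟨k, r⟩
          · exact (Bool.false_ne_true hok).elim
          · rw [Bool.and_eq_true, decide_eq_true_iff] at hok
            obtain ⟨hk, hok'⟩ := hok
            have hsome : ((store.get? (k - ka))).isSome = true := (hkeys (k - ka)).1 hk
            cases hv : store.get? (k - ka) with
            | none => rw [hv] at hsome; exact absurd hsome (by simp)
            | some v =>
              obtain ⟨p, hs, hpv⟩ : ∃ p, scanB prev (k - ka) = some p ∧ v = p.1 - p.2 := by
                have hinv := hst (k - ka); rw [hv] at hinv
                cases hs : scanB prev (k - ka) with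
                | none => rw [hs] at hinv; exact absurd hinv (by simp)
                | some p =>
                  rw [hs] at hinv
                  simp only [Option.map_some, Option.some.injEq] at hinv
                  exact ⟨p, rfl, hinv⟩
              have hst' : ∀ k', store.get? k' =
                  (scanB (("get", k :: r, (ka, va)) :: prev) k').map (fun p => p.1 - p.2) := by
                intro k'
                show _ = (scanB prev k').map _
                exact hst k'
              have hkeys' : ∀ k', k' ∈ keys ↔ ((store.get? k')).isSome := hkeys
              obtain ⟨fs', hfs', hp2⟩ := ih qs' store (("get", k :: r, (ka, va)) :: prev)
                (out + (v + va)) ka va keys hst' hkeys' hok'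
              refine ⟨(ka, va) :: fs', ?_, ?_⟩
              · show (framesB qts qs' ka va).map ((ka, va) :: ·) = some ((ka, va) :: fs')
                rw [hfs']; rfl
              · show pass2B (("get", k :: r, (ka, va)) :: (qts.zip (qs'.zip fs'))) prev out = _
                simp only [pass2B, loopA, hv, hs]
                rw [if_neg (by decide : ¬ ("get" : String) = "insert")]
                have harg : out + (p.1 - p.2 + va) = out + (v + va) := by rw [hpv]
                rw [harg]
                exact hp2
        · rw [if_neg h2] at hok
          by_cases h3 : qt = "addToKey"
          · subst h3
            rw [if_pos rfl] at hok
            rcases q with _ | ⟨x, r⟩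
            · exact (Bool.false_ne_true hok).elim
            · have hok' : okA qts qs' (ka + x) keys = true := hok
              have hst' : ∀ k', store.get? k' =
                  (scanB (("addToKey", x :: r, (ka, va)) :: prev) k').map (fun p => p.1 - p.2) := by
                intro k'
                show _ = (scanB prev k').map _
                exact hst k'
              obtain ⟨fs', hfs', hp2⟩ := ih qs' store (("addToKey", x :: r, (ka, va)) :: prev)
                out (ka + x) va keys hst' hkeys hok'
              refine ⟨(ka, va) :: fs', ?_, ?_⟩
              · show (framesB qts qs' (ka + x) va).map ((ka, va) :: ·) = some ((ka, va) :: fs')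
                rw [hfs']; rfl
              · show pass2B (("addToKey", x :: r, (ka, va)) :: (qts.zip (qs'.zip fs'))) prev out = _
                simp only [pass2B, loopA]
                rw [if_neg (by decide : ¬ ("addToKey" : String) = "insert"),
                    if_neg (by decide : ¬ ("addToKey" : String) = "get")]
                exact hp2
          · rw [if_neg h3] at hok
            by_cases h4 : qt = "addToValue"
            · subst h4
              rw [if_pos rfl] at hok
              rcases q with _ | ⟨x, r⟩
              · exact (Bool.false_ne_true hok).elim
              · have hok' : okA qts qs' ka keys = true := hok
                have hst' : ∀ k', store.get? k' =
                    (scanB (("addToValue", x :: r, (ka, va)) :: prev) k').map (fun p => p.1 - p.2) := by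
                  intro k'
                  show _ = (scanB prev k').map _
                  exact hst k'
                obtain ⟨fs', hfs', hp2⟩ := ih qs' store (("addToValue", x :: r, (ka, va)) :: prev)
                  out ka (va + x) keys hst' hkeys hok'
                refine ⟨(ka, va) :: fs', ?_, ?_⟩
                · show (framesB qts qs' ka (va + x)).map ((ka, va) :: ·) = some ((ka, va) :: fs')
                  rw [hfs']; rfl
                · show pass2B (("addToValue", x :: r, (ka, va)) :: (qts.zip (qs'.zip fs'))) prev out = _
                  simp only [pass2B, loopA]
                  rw [if_neg (by decide : ¬ ("addToValue" : String) = "insert"),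
                      if_neg (by decide : ¬ ("addToValue" : String) = "get")]
                  exact hp2
            · rw [if_neg h4] at hok
              have hok' : okA qts qs' ka keys = true := hok
              have hst' : ∀ k', store.get? k' =
                  (scanB ((qt, q, (ka, va)) :: prev) k').map (fun p => p.1 - p.2) := by
                intro k'
                show _ = (if qt = "insert" then _ else scanB prev k').map _
                rw [if_neg h1]
                exact hst k'
              obtain ⟨fs', hfs', hp2⟩ := ih qs' store ((qt, q, (ka, va)) :: prev)
                out ka va keys hst' hkeys hok'
              refine ⟨(ka, va) :: fs', ?_, ?_⟩
              · show (if qt = "addToKey" then _ else if qt = "addToValue" then _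
                    else (framesB qts qs' ka va).map ((ka, va) :: ·)) = some ((ka, va) :: fs')
                rw [if_neg h3, if_neg h4, hfs']; rfl
              · show pass2B ((qt, q, (ka, va)) :: (qts.zip (qs'.zip fs'))) prev out = _
                simp only [pass2B, loopA]
                rw [if_neg h1, if_neg h2, if_neg h3, if_neg h4, if_neg h2]
                exact hp2


lemma kaPre_succ (qt : List String) (q : List (List Int)) (p : Nat) :
    kaPre qt q (p + 1) = kaPre qt q p +
      (if qt.getD p "" = "addToKey" then (q.getD p []).headD 0 else 0) := by
  simp [kaPre, List.range_succ]

lemma getD_ne_nil_lt {q : List (List Int)} {i : Nat} (h : q.getD i [] ≠ []) : i < q.length := by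
  by_contra hc
  exact h (List.getD_eq_default q [] (Nat.le_of_not_lt hc))

-- The closed-form Pre_ implies okA along every suffix, tracking the already-inserted keys.
lemma okA_of_pre_aux (qt : List String) (q : List (List Int))
    (hsh : ∀ i, i < qt.length →
      (qt.getD i "" = "insert" → (q.getD i []).length = 2) ∧
      ((qt.getD i "" = "get" ∨ qt.getD i "" = "addToKey" ∨ qt.getD i "" = "addToValue") →
        q.getD i [] ≠ []))
    (hget : ∀ j, j < qt.length → qt.getD j "" = "get" →
      ∃ i, i < j ∧ qt.getD i "" = "insert" ∧
        (q.getD i []).headD 0 - kaPre qt q i = (q.getD j []).headD 0 - kaPre qt q j) :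
    ∀ (m p : Nat) (keys : List Int), qt.length - p = m →
      (∀ i, i < p → qt.getD i "" = "insert" →
        ((q.getD i []).headD 0 - kaPre qt q i) ∈ keys) →
      okA (qt.drop p) (q.drop p) (kaPre qt q p) keys = true := by
  intro m
  induction m with
  | zero =>
    intro p keys hm _
    have : qt.length ≤ p := by omega
    rw [List.drop_of_length_le this]
    rfl
  | succ m ih =>
    intro p keys hm hkeys
    have hp : p < qt.length := by omega
    have hqt : qt.drop p = qt[p] :: qt.drop (p + 1) := List.drop_eq_getElem_cons hp
    have hqtp : qt.getD p "" = qt[p] := List.getD_eq_getElem qt "" hp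
    obtain ⟨hins, hrec⟩ := hsh p hp
    by_cases h1 : qt[p] = "insert"
    · have hlen : (q.getD p []).length = 2 := hins (by rw [hqtp, h1])
      have hql : p < q.length := getD_ne_nil_lt (by intro he; rw [he] at hlen; simp at hlen)
      have hq : q.drop p = q[p] :: q.drop (p + 1) := List.drop_eq_getElem_cons hql
      have hqp : q.getD p [] = q[p] := List.getD_eq_getElem q [] hql
      rw [hqt, hq]
      rcases hqe : q[p] with _ | ⟨x, _ | ⟨y, _ | ⟨z, r⟩⟩⟩ <;>
        rw [hqp, hqe] at hlen <;> simp at hlen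
      show okA (qt[p] :: qt.drop (p + 1)) ((x :: y :: []) :: q.drop (p + 1))
        (kaPre qt q p) keys = true
      rw [h1]
      show okA (qt.drop (p + 1)) (q.drop (p + 1)) (kaPre qt q p)
        ((x - kaPre qt q p) :: keys) = true
      have hka : kaPre qt q (p + 1) = kaPre qt q p := by
        rw [kaPre_succ, if_neg (by rw [hqtp, h1]; decide), add_zero]
      rw [← hka]
      refine ih (p + 1) _ (by omega) ?_
      intro i hi hiins
      rcases Nat.lt_succ_iff_lt_or_eq.mp hi with hi' | hi'
      · exact List.mem_cons_of_mem _ (hkeys i hi' hiins)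
      · subst hi'
        have : (q.getD i []).headD 0 = x := by rw [hqp, hqe]; rfl
        rw [this, hka]
        exact List.mem_cons_self
    · by_cases h2 : qt[p] = "get"
      · have hne : q.getD p [] ≠ [] := hrec (by rw [hqtp, h2]; exact Or.inl rfl)
        have hql : p < q.length := getD_ne_nil_lt hne
        have hq : q.drop p = q[p] :: q.drop (p + 1) := List.drop_eq_getElem_cons hql
        have hqp : q.getD p [] = q[p] := List.getD_eq_getElem q [] hql
        rw [hqt, hq]
        rcases hqe : q[p] with _ | ⟨k, r⟩
        · exact absurd (hqp.trans hqe) hne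
        · show okA (qt[p] :: qt.drop (p + 1)) ((k :: r) :: q.drop (p + 1))
            (kaPre qt q p) keys = true
          rw [h2]
          show (decide ((k - kaPre qt q p) ∈ keys) &&
            okA (qt.drop (p + 1)) (q.drop (p + 1)) (kaPre qt q p) keys) = true
          rw [Bool.and_eq_true, decide_eq_true_iff]
          constructor
          · obtain ⟨i, hij, hiins, heq⟩ := hget p hp (by rw [hqtp, h2])
            have hkx : (q.getD p []).headD 0 = k := by rw [hqp, hqe]; rfl
            rw [hkx] at heq
            have := hkeys i hij hiins
            rwa [heq] at this
          · have hka : kaPre qt q (p + 1) = kaPre qt q p := by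
              rw [kaPre_succ, if_neg (by rw [hqtp, h2]; decide), add_zero]
            rw [← hka]
            exact ih (p + 1) keys (by omega)
              (fun i hi hiins => hkeys i (by
                rcases Nat.lt_succ_iff_lt_or_eq.mp hi with h | h
                · exact h
                · subst h; rw [hqtp, h2] at hiins; exact absurd hiins (by decide)) hiins)
      · by_cases h3 : qt[p] = "addToKey"
        · have hne : q.getD p [] ≠ [] := hrec (by rw [hqtp, h3]; exact Or.inr (Or.inl rfl))
          have hql : p < q.length := getD_ne_nil_lt hne
          have hq : q.drop p = q[p] :: q.drop (p + 1) := List.drop_eq_getElem_cons hql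
          have hqp : q.getD p [] = q[p] := List.getD_eq_getElem q [] hql
          rw [hqt, hq]
          rcases hqe : q[p] with _ | ⟨x, r⟩
          · exact absurd (hqp.trans hqe) hne
          · show okA (qt[p] :: qt.drop (p + 1)) ((x :: r) :: q.drop (p + 1))
              (kaPre qt q p) keys = true
            rw [h3]
            show okA (qt.drop (p + 1)) (q.drop (p + 1)) (kaPre qt q p + x) keys = true
            have hka : kaPre qt q (p + 1) = kaPre qt q p + x := by
              rw [kaPre_succ, if_pos (by rw [hqtp, h3])]
              rw [hqp, hqe]; rfl
            rw [← hka]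
            exact ih (p + 1) keys (by omega)
              (fun i hi hiins => hkeys i (by
                rcases Nat.lt_succ_iff_lt_or_eq.mp hi with h | h
                · exact h
                · subst h; rw [hqtp, h3] at hiins; exact absurd hiins (by decide)) hiins)
        · by_cases h4 : qt[p] = "addToValue"
          · have hne : q.getD p [] ≠ [] := hrec (by rw [hqtp, h4]; exact Or.inr (Or.inr rfl))
            have hql : p < q.length := getD_ne_nil_lt hne
            have hq : q.drop p = q[p] :: q.drop (p + 1) := List.drop_eq_getElem_cons hql
            have hqp : q.getD p [] = q[p] := List.getD_eq_getElem q [] hql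
            rw [hqt, hq]
            rcases hqe : q[p] with _ | ⟨x, r⟩
            · exact absurd (hqp.trans hqe) hne
            · show okA (qt[p] :: qt.drop (p + 1)) ((x :: r) :: q.drop (p + 1))
                (kaPre qt q p) keys = true
              rw [h4]
              show okA (qt.drop (p + 1)) (q.drop (p + 1)) (kaPre qt q p) keys = true
              have hka : kaPre qt q (p + 1) = kaPre qt q p := by
                rw [kaPre_succ, if_neg (by rw [hqtp, h4]; decide), add_zero]
              rw [← hka]
              exact ih (p + 1) keys (by omega)
                (fun i hi hiins => hkeys i (by
                  rcases Nat.lt_succ_iff_lt_or_eq.mp hi with h | h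
                  · exact h
                  · subst h; rw [hqtp, h4] at hiins; exact absurd hiins (by decide)) hiins)
          · rw [hqt]
            show okA (qt[p] :: qt.drop (p + 1)) (q.drop p) (kaPre qt q p) keys = true
            simp only [okA, if_neg h1, if_neg h2, if_neg h3, if_neg h4]
            have hdrop : (q.drop p).drop 1 = q.drop (p + 1) := by
              rw [List.drop_drop]
            rw [hdrop]
            have hka : kaPre qt q (p + 1) = kaPre qt q p := by
              rw [kaPre_succ, if_neg (by rw [hqtp]; exact h3), add_zero]
            rw [← hka]
            exact ih (p + 1) keys (by omega)
              (fun i hi hiins => hkeys i (by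
                rcases Nat.lt_succ_iff_lt_or_eq.mp hi with h | h
                · exact h
                · subst h; rw [hqtp] at hiins; exact absurd hiins h1) hiins)

lemma okA_of_pre (qt : List String) (q : List (List Int)) (hpre : Pre_solution qt q) :
    okA qt q 0 [] = true := by
  obtain ⟨hsh, hget⟩ := hpre
  have := okA_of_pre_aux qt q hsh hget qt.length 0 [] (by omega)
    (fun i hi _ => absurd hi (Nat.not_lt_zero i))
  simpa [kaPre] using this

-- ===== VERDICT (by name: the statement is the Claim_ definition above) =====
theorem solution_spec : Claim_equal_solution := by
  intro queryType query _ hpre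
  unfold Spec_solution solution solution_alt
  obtain ⟨fs, hfs, hp2⟩ := loop_agree queryType query PySem.Dict.empty [] 0 0 0 []
    (fun k => by simp [PySem.Dict.get?_empty, scanB])
    (fun k => by simp [PySem.Dict.get?_empty])
    (okA_of_pre queryType query hpre)
  rw [hfs]
  show ((loopA queryType query PySem.Dict.empty 0 0 0).getD 0) =
    ((pass2B (queryType.zip (query.zip fs)) [] 0).getD 0)
  rw [hp2]
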